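-- pv_equiv track=rewrite | github.com/mrveiss/AutoBot-AI | autobot-backend/utils/adaptive_memory_manager.py | _cleanup_cache_entries
-- ===== SOURCE A (Python) =====
-- def _cleanup_cache_entries(cache: "OrderedDict", count: int) -> int:
--     """Remove oldest entries from a cache (Issue #315: extracted).
--
--     Args:
--         cache: The OrderedDict cache to clean
--         count: Number of entries to remove
--
--     Returns:
--         Number of entries actually removed
--     """
--     removed = 0
--     for _ in range(count):
--         if not cache:
--             break
--         removed_key = next(iter(cache))
--         cache.pop(removed_key)
--         removed += 1
--     return removed
-- ===== SOURCE B (Python) =====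
-- def _cleanup_cache_entries(cache: "OrderedDict", count: int) -> int:
--     """Remove oldest entries from a cache: precompute the oldest keys, then delete them."""
--     to_remove = list(cache)[:max(0, count)]
--     for k in to_remove:
--         del cache[k]
--     return len(to_remove)
-- ===== Notes on version B (the rewrite author's own statement) =====
-- stated objective: simpler
-- what changed: B precomputes the slice of oldest keys and deletes them in one pass, returning the slice length, instead of A's guarded pop-one-at-a-time loop with a running counter and per-iteration emptiness check.
import Mathlib
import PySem

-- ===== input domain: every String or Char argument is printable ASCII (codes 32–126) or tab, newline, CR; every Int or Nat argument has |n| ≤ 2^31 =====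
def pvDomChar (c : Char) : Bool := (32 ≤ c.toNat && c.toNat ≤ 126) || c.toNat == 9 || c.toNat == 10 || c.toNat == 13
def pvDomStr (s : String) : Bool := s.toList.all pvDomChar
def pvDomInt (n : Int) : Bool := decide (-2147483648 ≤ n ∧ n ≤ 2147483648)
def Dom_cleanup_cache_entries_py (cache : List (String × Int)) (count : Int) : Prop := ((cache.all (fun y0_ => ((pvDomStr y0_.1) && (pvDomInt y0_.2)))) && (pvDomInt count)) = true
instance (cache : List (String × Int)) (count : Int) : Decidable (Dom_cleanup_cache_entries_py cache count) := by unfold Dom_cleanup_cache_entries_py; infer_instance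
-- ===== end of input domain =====

-- B replaces A's guarded pop-one-at-a-time loop with a precomputed slice of the oldest
-- keys followed by a deletion pass (simpler decomposition); equivalence proved here is
-- about the RETURN value — both Pythons also perform the same mutation (delete the same keys).

-- ===== PORT A =====
-- for _ in range(count): if not cache: break; cache.pop(next(iter(cache))); removed += 1
-- popping the first key of a dict (unique keys) removes exactly the first entry.
def cleanupA_loop : List (String × Int) → Nat → Int → Int
  | _, 0, removed => removed
  | [], _ + 1, removed => removed
  | _ :: rest, n + 1, removed => cleanupA_loop rest n (removed + 1)

def cleanup_cache_entries_py (cache : List (String × Int)) (count : Int) : Int :=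
  cleanupA_loop cache count.toNat 0

-- ===== PORT B =====
-- to_remove = list(cache)[:max(0, count)]; for k in to_remove: del cache[k]; return len(to_remove)
-- (the deletion pass only mutates the caller's dict; the return value is len(to_remove))
def cleanup_cache_entries_py_alt (cache : List (String × Int)) (count : Int) : Int :=
  let to_remove := (cache.map Prod.fst).take (max 0 count).toNat
  (to_remove.length : Int)

-- ===== PRECONDITION & SPEC =====
def Spec_cleanup_cache_entries_py (cache : List (String × Int)) (count : Int) (out : Int) : Prop := out = cleanup_cache_entries_py_alt cache count
instance (cache : List (String × Int)) (count : Int) (out : Int) : Decidable (Spec_cleanup_cache_entries_py cache count out) := by unfold Spec_cleanup_cache_entries_py; infer_instance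

-- ===== CLAIM (what is proved, stated in full; the proofs are below) =====
def Claim_equal_cleanup_cache_entries_py : Prop := ∀ (cache : List (String × Int)) (count : Int), Dom_cleanup_cache_entries_py cache count → Spec_cleanup_cache_entries_py cache count (cleanup_cache_entries_py cache count)

-- ===== LEMMAS AND PROOFS =====
theorem cleanupA_loop_eq (n : Nat) : ∀ (cache : List (String × Int)) (removed : Int),
    cleanupA_loop cache n removed = removed + min (n : Int) (cache.length : Int) := by
  induction n with
  | zero => intro cache removed; simp [cleanupA_loop]
  | succ k ih =>
    intro cache removed
    cases cache with
    | nil => simp [cleanupA_loop]; omega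
    | cons p rest =>
      rw [cleanupA_loop, ih]
      simp only [List.length_cons]
      push_cast
      omega

-- ===== VERDICT (by name: the statement is the Claim_ definition above) =====
theorem cleanup_cache_entries_py_spec : Claim_equal_cleanup_cache_entries_py := by
  intro cache count _
  unfold Spec_cleanup_cache_entries_py cleanup_cache_entries_py cleanup_cache_entries_py_alt
  rw [cleanupA_loop_eq]
  simp only [List.length_take, List.length_map]
  push_cast
  omega
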